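-- pv_equiv track=rewrite | github.com/alice-d/advent-of-code | 2021/18/day18.py | shouldExplode
-- ===== SOURCE A (Python) =====
-- def shouldExplode(snail):
--     size = len(snail)
--     level=0
--     explodeAt=None
--     beforeDigitIndex=None
--     for i in range(size):
--         c = snail[i]
--         if c=="[":
--             level+=1
--             if level==5:
--                 explodeAt=i
--                 break
--         elif c=="]":
--             level-=1
--         elif c.isdigit():
--             beforeDigitIndex=i
--     return explodeAt, beforeDigitIndex
-- ===== SOURCE B (Python) =====
-- def shouldExplode(snail):
--     level = 0
--     explodeAt = None
--     for i, c in enumerate(snail):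
--         if c == "[":
--             level += 1
--             if level == 5:
--                 explodeAt = i
--                 break
--         elif c == "]":
--             level -= 1
--     end = explodeAt if explodeAt is not None else len(snail)
--     beforeDigitIndex = None
--     for j in range(end - 1, -1, -1):
--         if snail[j].isdigit():
--             beforeDigitIndex = j
--             break
--     return explodeAt, beforeDigitIndex
-- ===== Notes on version B (the rewrite author's own statement) =====
-- stated objective: alternative
-- what changed: B splits A's single loop with a running last-digit tracker into a bracket-level scan that finds only explodeAt, followed by a dedicated backward scan over the prefix before it (or the whole string) that stops at the first digit found.
import Mathlib
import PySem

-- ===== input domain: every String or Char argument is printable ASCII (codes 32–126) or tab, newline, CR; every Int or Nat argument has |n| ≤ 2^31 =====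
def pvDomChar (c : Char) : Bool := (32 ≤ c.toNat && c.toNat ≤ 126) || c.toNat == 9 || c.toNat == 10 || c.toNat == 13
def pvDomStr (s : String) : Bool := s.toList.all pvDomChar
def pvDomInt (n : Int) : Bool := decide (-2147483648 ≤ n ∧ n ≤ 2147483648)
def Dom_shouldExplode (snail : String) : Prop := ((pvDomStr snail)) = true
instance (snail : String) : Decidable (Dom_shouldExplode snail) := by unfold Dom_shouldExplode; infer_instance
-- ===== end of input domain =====

-- B replaces A's inline running last-digit tracker with a separate backward scan over the
-- prefix before the explode point (objective: alternative decomposition, same cost).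

-- ===== PORT A =====
-- A's single loop: i = absolute index, level, bd = running last-digit index.
-- c.isdigit() on a single char = PySem.Chars.isdigit (exact on the ASCII domain).
def shouldExplodeLoop : List Char → Nat → Int → Option Nat → Option Nat × Option Nat
  | [], _, _, bd => (none, bd)
  | c :: cs, i, level, bd =>
    if c = '[' then
      if level + 1 = 5 then (some i, bd)
      else shouldExplodeLoop cs (i + 1) (level + 1) bd
    else if c = ']' then shouldExplodeLoop cs (i + 1) (level - 1) bd
    else if PySem.Chars.isdigit c then shouldExplodeLoop cs (i + 1) level (some i)
    else shouldExplodeLoop cs (i + 1) level bd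

def shouldExplode (snail : String) : Option Int × Option Int :=
  let r := shouldExplodeLoop snail.toList 0 0 none
  (r.1.map Int.ofNat, r.2.map Int.ofNat)

-- ===== PORT B =====
-- B's first loop: find only explodeAt.
def altExpLoop : List Char → Nat → Int → Option Nat
  | [], _, _ => none
  | c :: cs, i, level =>
    if c = '[' then
      if level + 1 = 5 then some i else altExpLoop cs (i + 1) (level + 1)
    else if c = ']' then altExpLoop cs (i + 1) (level - 1)
    else altExpLoop cs (i + 1) level

-- B's second loop: 'for j in range(end-1,-1,-1)' = walk the reversed prefix with j counting down.
def altBackLoop : List Char → Nat → Option Nat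
  | [], _ => none
  | c :: cs, j => if PySem.Chars.isdigit c then some j else altBackLoop cs (j - 1)

def shouldExplode_alt (snail : String) : Option Int × Option Int :=
  let l := snail.toList
  let explodeAt := altExpLoop l 0 0
  let endIdx := match explodeAt with | some e => e | none => l.length
  let beforeDigitIndex := altBackLoop (l.take endIdx).reverse (endIdx - 1)
  (explodeAt.map Int.ofNat, beforeDigitIndex.map Int.ofNat)

-- ===== PRECONDITION & SPEC =====
def Spec_shouldExplode (snail : String) (out : Option Int × Option Int) : Prop := out = shouldExplode_alt snail
instance (snail : String) (out : Option Int × Option Int) : Decidable (Spec_shouldExplode snail out) := by unfold Spec_shouldExplode; infer_instance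

-- ===== CLAIM (what is proved, stated in full; the proofs are below) =====
def Claim_equal_shouldExplode : Prop := ∀ (snail : String), Dom_shouldExplode snail → Spec_shouldExplode snail (shouldExplode snail)

-- ===== LEMMAS AND PROOFS =====

-- relative explode position
def expRel : List Char → Int → Option Nat
  | [], _ => none
  | c :: cs, lv =>
    if c = '[' then
      if lv + 1 = 5 then some 0 else (expRel cs (lv + 1)).map (· + 1)
    else if c = ']' then (expRel cs (lv - 1)).map (· + 1)
    else (expRel cs lv).map (· + 1)

def stopN (l : List Char) (lv : Int) : Nat := (expRel l lv).getD l.length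

-- forward last-digit scan (what A maintains on the pre-explosion prefix)
def lastDig : List Char → Nat → Option Nat → Option Nat
  | [], _, bd => bd
  | c :: cs, i, bd => lastDig cs (i + 1) (if PySem.Chars.isdigit c then some i else bd)

theorem altExpLoop_eq (l : List Char) : ∀ (i : Nat) (lv : Int),
    altExpLoop l i lv = (expRel l lv).map (i + ·) := by
  induction l with
  | nil => intro i lv; rfl
  | cons c cs ih =>
    intro i lv
    simp only [altExpLoop, expRel]
    split_ifs with h1 h2 h3
    · simp
    · rw [ih]; cases expRel cs (lv + 1) <;> simp <;> omega
    · rw [ih]; cases expRel cs (lv - 1) <;> simp <;> omega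
    · rw [ih]; cases expRel cs lv <;> simp <;> omega

theorem expRel_lt (l : List Char) : ∀ (lv : Int) (k : Nat),
    expRel l lv = some k → k < l.length := by
  induction l with
  | nil => intro lv k h; simp [expRel] at h
  | cons c cs ih =>
    intro lv k h
    simp only [expRel] at h
    split_ifs at h with h1 h2 h3
    · simp at h; simp [← h]
    · cases hk : expRel cs (lv + 1) with
      | none => rw [hk] at h; simp at h
      | some m => rw [hk] at h; simp at h; have := ih _ _ hk; simp; omega
    · cases hk : expRel cs (lv - 1) with
      | none => rw [hk] at h; simp at h
      | some m => rw [hk] at h; simp at h; have := ih _ _ hk; simp; omega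
    · cases hk : expRel cs lv with
      | none => rw [hk] at h; simp at h
      | some m => rw [hk] at h; simp at h; have := ih _ _ hk; simp; omega

theorem loopA_eq (l : List Char) : ∀ (i : Nat) (lv : Int) (bd : Option Nat),
    shouldExplodeLoop l i lv bd =
      ((expRel l lv).map (i + ·), lastDig (l.take (stopN l lv)) i bd) := by
  induction l with
  | nil => intro i lv bd; rfl
  | cons c cs ih =>
    intro i lv bd
    simp only [shouldExplodeLoop, expRel, stopN]
    by_cases h1 : c = '['
    · by_cases h2 : lv + 1 = 5
      · simp [h1, h2, lastDig]
      · subst h1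
        rw [if_pos rfl, if_pos rfl, if_neg h2, if_neg h2, ih]
        have hd : PySem.Chars.isdigit '[' = false := by decide
        cases hk : expRel cs (lv + 1) <;> simp [hk, stopN, lastDig, hd] <;> omega
    · by_cases h2 : c = ']'
      · subst h2
        rw [if_neg h1, if_neg h1, if_pos rfl, if_pos rfl, ih]
        have hd : PySem.Chars.isdigit ']' = false := by decide
        cases hk : expRel cs (lv - 1) <;> simp [hk, stopN, lastDig, hd] <;> omega
      · rw [if_neg h1, if_neg h1, if_neg h2, if_neg h2, ih]
        by_cases h3 : PySem.Chars.isdigit c = true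
        · cases hk : expRel cs lv <;> simp [hk, stopN, lastDig, h3] <;> omega
        · have hd : PySem.Chars.isdigit c = false := by simpa using h3
          rw [if_neg h3, ih]
          cases hk : expRel cs lv <;> simp [hk, stopN, lastDig, hd] <;> omega

theorem lastDig_append (Q : List Char) : ∀ (R : List Char) (i : Nat) (bd : Option Nat),
    lastDig (Q ++ R) i bd = lastDig R (i + Q.length) (lastDig Q i bd) := by
  induction Q with
  | nil => intro R i bd; simp only [List.nil_append, lastDig, List.length_nil, Nat.add_zero]
  | cons c cs ih =>
    intro R i bd
    simp only [List.cons_append, lastDig, ih, List.length_cons]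
    ring_nf

theorem lastDig_eq_back (P : List Char) : ∀ (i : Nat) (bd : Option Nat),
    lastDig P i bd =
      match altBackLoop P.reverse (i + P.length - 1) with
      | some j => some j
      | none => bd := by
  induction P using List.reverseRecOn with
  | nil => intro i bd; simp only [List.reverse_nil, altBackLoop, lastDig]
  | append_singleton Q c ih =>
    intro i bd
    rw [lastDig_append]
    simp only [lastDig, List.reverse_append, List.reverse_singleton, List.singleton_append,
      altBackLoop, List.length_append, List.length_singleton]
    have h1 : i + (Q.length + 1) - 1 = i + Q.length := by omega
    rw [h1]
    by_cases hd : PySem.Chars.isdigit c = true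
    · simp [hd]
    · simp [hd, ih]

theorem shouldExplode_eq_alt (snail : String) : shouldExplode snail = shouldExplode_alt snail := by
  simp only [shouldExplode, shouldExplode_alt]
  rw [loopA_eq, altExpLoop_eq]
  set l := snail.toList with hl
  have hmap : (expRel l 0).map (0 + ·) = expRel l 0 := by
    cases expRel l 0 <;> simp
  simp only [hmap]
  have hend : (match expRel l 0 with | some e => e | none => l.length) = stopN l 0 := by
    unfold stopN; cases expRel l 0 <;> simp
  rw [hend]
  have hlen : (l.take (stopN l 0)).length = stopN l 0 := by
    rw [List.length_take]
    unfold stopN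
    cases hk : expRel l 0 with
    | none => simp
    | some k => simpa using le_of_lt (expRel_lt l 0 k hk)
  rw [lastDig_eq_back, hlen]
  simp only [Nat.zero_add]
  cases altBackLoop (l.take (stopN l 0)).reverse (stopN l 0 - 1) <;> simp

-- ===== VERDICT (by name: the statement is the Claim_ definition above) =====
theorem shouldExplode_spec : Claim_equal_shouldExplode := by
  intro snail _
  unfold Spec_shouldExplode
  exact shouldExplode_eq_alt snail
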